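-- pv_equiv track=rewrite | github.com/jkomkov/bulla | scripts/adversarial_submodularity_survey.py | partition_join
-- ===== SOURCE A (Python) =====
-- def partition_join(P, Q, names):
--     parent = {n: n for n in names}
--
--     def find(x):
--         while parent[x] != x:
--             parent[x] = parent[parent[x]]
--             x = parent[x]
--         return x
--
--     def union(a, b):
--         a, b = find(a), find(b)
--         if a != b:
--             parent[a] = b
--
--     for part in [P, Q]:
--         for group in part:
--             members = list(group)
--             for i in range(1, len(members)):
--                 union(members[0], members[i])
--     groups: dict[str, set[str]] = {}
--     for n in names:
--         r = find(n)
--         groups.setdefault(r, set()).add(n)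
--     return [frozenset(g) for g in groups.values()]
-- ===== SOURCE B (Python) =====
-- def partition_join(P, Q, names):
--     # Label propagation instead of a union-find forest: every name carries its
--     # component label directly; merging an edge relabels the losing class.
--     label = {n: n for n in names}
--     edges = [(g[0], m) for g in [list(s) for s in P] + [list(s) for s in Q] for m in g[1:]]
--     for u, v in edges:
--         lu, lv = label[u], label[v]
--         if lu != lv:
--             label = {n: (lv if l == lu else l) for n, l in label.items()}
--     seen = set()
--     out = []
--     for n in names:
--         l = label[n]
--         if l not in seen:
--             seen.add(l)
--             out.append(frozenset(m for m in names if label[m] == l))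
--     return out
-- ===== Notes on version B (the rewrite author's own statement) =====
-- stated objective: alternative
-- what changed: A's union-find forest (parent pointers, path-compressing find loop, root-keyed grouping dict) is replaced by direct label propagation: each name maps straight to its component label, a merge relabels the losing class in one pass over the map, and components are emitted at the first occurrence of each label, so B has no trees, no find loop and no grouping dict.
import Mathlib
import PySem

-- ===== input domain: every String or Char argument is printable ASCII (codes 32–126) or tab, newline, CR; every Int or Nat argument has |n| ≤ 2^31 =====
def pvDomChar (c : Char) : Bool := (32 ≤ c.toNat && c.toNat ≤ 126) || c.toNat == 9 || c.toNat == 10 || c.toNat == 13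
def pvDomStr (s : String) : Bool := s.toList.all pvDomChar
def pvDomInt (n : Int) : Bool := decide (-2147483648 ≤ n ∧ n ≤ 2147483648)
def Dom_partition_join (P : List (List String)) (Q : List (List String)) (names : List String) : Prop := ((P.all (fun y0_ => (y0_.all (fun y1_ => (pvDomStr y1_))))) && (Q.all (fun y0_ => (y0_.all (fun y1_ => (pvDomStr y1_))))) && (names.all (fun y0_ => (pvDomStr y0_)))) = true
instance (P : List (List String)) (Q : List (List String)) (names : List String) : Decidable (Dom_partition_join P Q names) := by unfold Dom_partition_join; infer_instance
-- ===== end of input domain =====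

-- B replaces A's union-find forest (path compression + root grouping) by direct label
-- propagation: every name carries its component label, merges relabel the losing class,
-- and components are emitted at the first occurrence of their label (objective: alternative).

-- ===== PORT A =====
-- find(x): while parent[x] != x: parent[x] = parent[parent[x]]; x = parent[x]; return x
-- The while loop is ported with a fuel guard only (names.length + 1 iterations always
-- suffice on the forest states this program reaches); none = KeyError on parent[x].
def pjFind (fuel : Nat) (parent : PySem.Dict String String) (x : String) :
    Option (String × PySem.Dict String String) :=
  match fuel with
  | 0 => some (x, parent)
  | fuel + 1 =>
    match parent.get? x with
    | none => none
    | some px =>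
      if px = x then some (x, parent)
      else
        match parent.get? px with
        | none => none
        | some ppx => pjFind fuel (parent.insert x ppx) ppx

-- union(a, b): a, b = find(a), find(b); if a != b: parent[a] = b
def pjUnion (fuel : Nat) (parent : PySem.Dict String String) (a b : String) :
    Option (PySem.Dict String String) :=
  match pjFind fuel parent a with
  | none => none
  | some (ra, p1) =>
    match pjFind fuel p1 b with
    | none => none
    | some (rb, p2) => some (if ra ≠ rb then p2.insert ra rb else p2)

-- for i in range(1, len(members)): union(members[0], members[i])
def pjUnions (fuel : Nat) (m0 : String) :
    PySem.Dict String String → List String → Option (PySem.Dict String String)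
  | parent, [] => some parent
  | parent, m :: rest =>
    match pjUnion fuel parent m0 m with
    | none => none
    | some p' => pjUnions fuel m0 p' rest

def pjGroup (fuel : Nat) (parent : PySem.Dict String String) :
    List String → Option (PySem.Dict String String)
  | [] => some parent
  | m0 :: rest => pjUnions fuel m0 parent rest

-- for part in [P, Q]: for group in part: …  (the groups are visited in the order P ++ Q)
def pjGroups (fuel : Nat) :
    PySem.Dict String String → List (List String) → Option (PySem.Dict String String)
  | parent, [] => some parent
  | parent, g :: gs =>
    match pjGroup fuel parent g with
    | none => none
    | some p' => pjGroups fuel p' gs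

-- for n in names: r = find(n); groups.setdefault(r, set()).add(n)
def pjCollect (fuel : Nat) :
    PySem.Dict String String → PySem.Dict String (PySem.Set String) → List String →
    Option (PySem.Dict String (PySem.Set String))
  | _, groups, [] => some groups
  | parent, groups, n :: rest =>
    match pjFind fuel parent n with
    | none => none
    | some (r, p') =>
      pjCollect fuel p' (groups.modify r PySem.Set.empty (fun s => s.add n)) rest

def partition_join (P : List (List String)) (Q : List (List String)) (names : List String) :
    List (List String) :=
  let parent := names.foldl (fun d n => d.insert n n) PySem.Dict.empty
  let fuel := names.length + 1
  match pjGroups fuel parent (P ++ Q) with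
  | none => []  -- KeyError (unreachable under Pre_)
  | some parent' =>
    match pjCollect fuel parent' PySem.Dict.empty names with
    | none => []  -- unreachable: every n ∈ names is a key
    | some groups => groups.values

-- ===== PORT B =====
-- label = {n: (lv if l == lu else l) for n, l in label.items()}
def pjbRelabel (label : PySem.Dict String String) (lu lv : String) :
    PySem.Dict String String :=
  PySem.Dict.mk (label.items.map (fun p => (p.1, if p.2 = lu then lv else p.2)))

-- edges = [(g[0], m) for g in [list(s) for s in P] + [list(s) for s in Q] for m in g[1:]]
def pjbEdges (gs : List (List String)) : List (String × String) :=
  gs.flatMap (fun g =>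
    match g with
    | [] => []
    | m0 :: rest => rest.map (fun m => (m0, m)))

-- for u, v in edges: lu, lv = label[u], label[v]; if lu != lv: relabel
def pjbMerge : PySem.Dict String String → List (String × String) →
    Option (PySem.Dict String String)
  | label, [] => some label
  | label, (u, v) :: es =>
    match label.get? u with
    | none => none  -- KeyError
    | some lu =>
      match label.get? v with
      | none => none  -- KeyError
      | some lv => pjbMerge (if lu ≠ lv then pjbRelabel label lu lv else label) es

-- for n in names: l = label[n]; if l not in seen: seen.add(l); out.append(frozenset(…))
def pjbOut (label : PySem.Dict String String) (names : List String) :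
    PySem.Set String → List (List String) → List String → Option (List (List String))
  | _, out, [] => some out
  | seen, out, n :: rest =>
    match label.get? n with
    | none => none  -- unreachable: every n ∈ names is a key
    | some l =>
      if l ∈ seen then pjbOut label names seen out rest
      else pjbOut label names (seen.add l)
        (out ++ [PySem.Set.ofList (names.filter (fun m => label.get? m == some l))]) rest

def partition_join_alt (P : List (List String)) (Q : List (List String)) (names : List String) :
    List (List String) :=
  let label := names.foldl (fun d n => d.insert n n) PySem.Dict.empty
  match pjbMerge label (pjbEdges (P ++ Q)) with
  | none => []  -- KeyError (unreachable under Pre_)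
  | some label' =>
    match pjbOut label' names PySem.Set.empty [] names with
    | none => []
    | some out => out

-- ===== PRECONDITION & SPEC =====
-- Pre_ excludes exactly the inputs where A raises KeyError: a group of size ≥ 2
-- containing a name absent from `names` (singleton groups trigger no union, so their
-- foreign names are harmless).
def Pre_partition_join (P : List (List String)) (Q : List (List String)) (names : List String) : Prop :=
  ∀ g ∈ P ++ Q, 2 ≤ g.length → ∀ m ∈ g, m ∈ names
instance (P : List (List String)) (Q : List (List String)) (names : List String) : Decidable (Pre_partition_join P Q names) := by unfold Pre_partition_join; infer_instance

def pvWitness_partition_join : List (List String) × List (List String) × List String :=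
  ([["a", "b"]], [["b", "c"], ["d"]], ["a", "b", "c", "d"])

def Spec_partition_join (P : List (List String)) (Q : List (List String)) (names : List String) (out : List (List String)) : Prop := out = partition_join_alt P Q names
instance (P : List (List String)) (Q : List (List String)) (names : List String) (out : List (List String)) : Decidable (Spec_partition_join P Q names out) := by unfold Spec_partition_join; infer_instance

-- ===== CLAIM (what is proved, stated in full; the proofs are below) =====
def Claim_equal_partition_join : Prop := ∀ (P : List (List String)) (Q : List (List String)) (names : List String), Dom_partition_join P Q names → Pre_partition_join P Q names → Spec_partition_join P Q names (partition_join P Q names)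

-- ===== LEMMAS AND PROOFS =====

-- The simulation invariant between A's parent forest and B's label map:
-- labels are exactly the forest's roots, every parent edge preserves the label,
-- and the forest is well-founded (some measure strictly drops along non-loop edges).
structure PJInv (names : List String) (parent label : PySem.Dict String String) : Prop where
  keysP : parent.keys = PySem.Set.ofList names
  keysL : label.keys = PySem.Set.ofList names
  step : ∀ k v, parent.get? k = some v → label.get? v = label.get? k
  root : ∀ k r, label.get? k = some r → parent.get? r = some r ∧ label.get? r = some r
  selfl : ∀ k, parent.get? k = some k → label.get? k = some k
  meas : ∃ d : String → Nat, ∀ k v, parent.get? k = some v → v = k ∨ d v < d k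

lemma pjInv_get?_none_iff (names : List String) (parent label : PySem.Dict String String)
    (h : PJInv names parent label) (k : String) :
    parent.get? k = none ↔ label.get? k = none := by
  rw [PySem.Dict.get?_eq_none_iff_not_mem_keys, PySem.Dict.get?_eq_none_iff_not_mem_keys,
    h.keysP, h.keysL]

-- any well-founded measure can be compressed below the number of keys
lemma pjInv_bounded_meas (names : List String) (parent label : PySem.Dict String String)
    (h : PJInv names parent label) :
    ∃ d : String → Nat, (∀ k v, parent.get? k = some v → v = k ∨ d v < d k) ∧
      (∀ k, k ∈ parent.keys → d k < parent.keys.length) := by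
  obtain ⟨d0, hd0⟩ := h.meas
  set ks := parent.keys with hks
  have hmemk : ∀ {k v : String}, parent.get? k = some v → k ∈ ks ∧ v ∈ ks := by
    intro k v hk
    have hkmem : k ∈ ks := by
      by_contra hmem
      have hnone : parent.get? k = none := by
        rw [PySem.Dict.get?_eq_none_iff_not_mem_keys]
        exact hmem
      rw [hnone] at hk
      cases hk
    refine ⟨hkmem, ?_⟩
    have hlab := h.step k v hk
    have hksome : label.get? k ≠ none := by
      intro hnone
      rw [PySem.Dict.get?_eq_none_iff_not_mem_keys, h.keysL, ← h.keysP] at hnone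
      exact hnone hkmem
    by_contra hvmem
    have hnone : label.get? v = none := by
      rw [PySem.Dict.get?_eq_none_iff_not_mem_keys, h.keysL, ← h.keysP]
      exact hvmem
    rw [hlab] at hnone
    exact hksome hnone
  set S : Finset Nat := (ks.map d0).toFinset with hS
  refine ⟨fun k => (S.filter (· < d0 k)).card, ?_, ?_⟩
  · intro k v hkv
    rcases hd0 k v hkv with heq | hlt
    · exact Or.inl heq
    · right
      obtain ⟨hkmem, hvmem⟩ := hmemk hkv
      apply Finset.card_lt_card
      constructor
      · intro a ha
        simp only [Finset.mem_filter] at ha ⊢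
        exact ⟨ha.1, lt_trans ha.2 hlt⟩
      · intro hsub
        have : d0 v ∈ S.filter (· < d0 k) := by
          simp only [Finset.mem_filter, hS, List.mem_toFinset]
          exact ⟨List.mem_map_of_mem hvmem, hlt⟩
        have := hsub this
        simp at this
  · intro k hkmem
    have hdk : d0 k ∈ S := by
      simp only [hS, List.mem_toFinset]
      exact List.mem_map_of_mem hkmem
    have hsub : S.filter (· < d0 k) ⊆ S.erase (d0 k) := by
      intro a ha
      simp only [Finset.mem_filter] at ha
      exact Finset.mem_erase.mpr ⟨Nat.ne_of_lt ha.2, ha.1⟩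
    calc (S.filter (· < d0 k)).card ≤ (S.erase (d0 k)).card := Finset.card_le_card hsub
      _ < S.card := Finset.card_erase_lt_of_mem hdk
      _ ≤ (ks.map d0).length := by rw [hS]; simpa using (ks.map d0).toFinset_card_le
      _ = ks.length := List.length_map _

lemma pjFind_ok (names : List String) (label : PySem.Dict String String) (d : String → Nat) :
    ∀ (fuel : Nat) (parent : PySem.Dict String String) (x lx : String),
      PJInv names parent label →
      (∀ k v, parent.get? k = some v → v = k ∨ d v < d k) →
      label.get? x = some lx → d x < fuel →
      ∃ p', pjFind fuel parent x = some (lx, p') ∧ PJInv names p' label ∧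
        (∀ k v, p'.get? k = some v → v = k ∨ d v < d k) := by
  intro fuel
  induction fuel with
  | zero => intro parent x lx _ _ _ hfuel; omega
  | succ fuel ih =>
    intro parent x lx hInv hd hx hfuel
    obtain ⟨px, hpx⟩ : ∃ px, parent.get? x = some px := by
      cases hpxe : parent.get? x with
      | none =>
        rw [pjInv_get?_none_iff names parent label hInv] at hpxe
        rw [hpxe] at hx; cases hx
      | some px => exact ⟨px, rfl⟩
    by_cases hpxx : px = x
    · subst hpxx
      have hself := hInv.selfl px hpx
      rw [hself] at hx
      cases hx
      exact ⟨parent, by simp [pjFind, hpx], hInv, hd⟩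
    · have hlabpx : label.get? px = some lx := by rw [hInv.step x px hpx]; exact hx
      obtain ⟨ppx, hppx⟩ : ∃ ppx, parent.get? px = some ppx := by
        cases hpe : parent.get? px with
        | none =>
          rw [pjInv_get?_none_iff names parent label hInv] at hpe
          rw [hpe] at hlabpx; cases hlabpx
        | some ppx => exact ⟨ppx, rfl⟩
      have hdpx : d px < d x := (hd x px hpx).resolve_left hpxx
      have hdppx : d ppx < d x := by
        rcases hd px ppx hppx with he | hlt
        · rw [he]; exact hdpx
        · exact lt_trans hlt hdpx
      have hppxne : ppx ≠ x := by intro he; rw [he] at hdppx; omega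
      have hlabppx : label.get? ppx = some lx := by rw [hInv.step px ppx hppx]; exact hlabpx
      have hcont : parent.contains x = true := by
        rw [PySem.Dict.contains_eq_isSome_get?, hpx]; rfl
      have hd1 : ∀ k v, (parent.insert x ppx).get? k = some v → v = k ∨ d v < d k := by
        intro k v hkv
        rw [PySem.Dict.get?_insert] at hkv
        split at hkv
        · rename_i hkx; cases hkv; right; rw [hkx]; exact hdppx
        · exact hd k v hkv
      have hInv1 : PJInv names (parent.insert x ppx) label := by
        refine ⟨?_, hInv.keysL, ?_, ?_, ?_, ⟨d, hd1⟩⟩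
        · rw [PySem.Dict.keys_insert_of_contains parent ppx hcont, hInv.keysP]
        · intro k v hkv
          rw [PySem.Dict.get?_insert] at hkv
          split at hkv
          · rename_i hkx; cases hkv; rw [hkx, hlabppx, hx]
          · exact hInv.step k v hkv
        · intro k r hkr
          obtain ⟨hr1, hr2⟩ := hInv.root k r hkr
          refine ⟨?_, hr2⟩
          rw [PySem.Dict.get?_insert]
          split
          · rename_i hrx; rw [hrx] at hr1; rw [hr1] at hpx; cases hpx; exact absurd rfl hpxx
          · exact hr1
        · intro k hk
          rw [PySem.Dict.get?_insert] at hk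
          split at hk
          · rename_i hkx; injection hk with he; exact absurd (he.trans hkx) hppxne
          · exact hInv.selfl k hk
      obtain ⟨p', hp', hInv', hd'⟩ := ih (parent.insert x ppx) ppx lx hInv1 hd1 hlabppx (by omega)
      refine ⟨p', ?_, hInv', hd'⟩
      simp [pjFind, hpx, hpxx, hppx, hp']

lemma get?_pjbRelabel (label : PySem.Dict String String) (lu lv k : String) :
    (pjbRelabel label lu lv).get? k
      = (label.get? k).map (fun l => if l = lu then lv else l) := by
  obtain ⟨its⟩ := label
  induction its with
  | nil => simp [pjbRelabel, PySem.Dict.get?]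
  | cons p rest ih =>
    obtain ⟨a, w⟩ := p
    simp only [pjbRelabel, List.map_cons, PySem.Dict.get?_mk_cons] at *
    by_cases hak : a == k
    · simp [hak]
    · simp [hak, ih]

lemma keys_pjbRelabel (label : PySem.Dict String String) (lu lv : String) :
    (pjbRelabel label lu lv).keys = label.keys := by
  obtain ⟨its⟩ := label
  simp [pjbRelabel, PySem.Dict.keys]

lemma pjInv_mem_keysL (names : List String) (parent label : PySem.Dict String String)
    (h : PJInv names parent label) {k : String} {l : String}
    (hk : label.get? k = some l) : k ∈ parent.keys := by
  rw [h.keysP, ← h.keysL]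
  by_contra hmem
  rw [← PySem.Dict.get?_eq_none_iff_not_mem_keys] at hmem
  rw [hmem] at hk; cases hk

lemma pjUnion_ok (names : List String) (parent label : PySem.Dict String String)
    (u v lu lv : String) (h : PJInv names parent label)
    (hu : label.get? u = some lu) (hv : label.get? v = some lv) :
    ∃ p', pjUnion (names.length + 1) parent u v = some p' ∧
      PJInv names p' (if lu ≠ lv then pjbRelabel label lu lv else label) := by
  obtain ⟨d, hd, hbd⟩ := pjInv_bounded_meas names parent label h
  have hlen : parent.keys.length ≤ names.length := by
    rw [h.keysP]; exact PySem.Set.length_ofList_le names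
  have hdu : d u < names.length + 1 := by
    have := hbd u (pjInv_mem_keysL names parent label h hu); omega
  have hdv : d v < names.length + 1 := by
    have := hbd v (pjInv_mem_keysL names parent label h hv); omega
  obtain ⟨p1, hf1, hInv1, hd1⟩ :=
    pjFind_ok names label d (names.length + 1) parent u lu h hd hu hdu
  obtain ⟨p2, hf2, hInv2, hd2⟩ :=
    pjFind_ok names label d (names.length + 1) p1 v lv hInv1 hd1 hv hdv
  by_cases hne : lu = lv
  · refine ⟨p2, ?_, ?_⟩
    · simp [pjUnion, hf1, hf2, hne]
    · simp only [hne, ne_eq, not_true_eq_false]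
      simpa [hne] using hInv2
  · have hlulab : label.get? lu = some lu := (hInv2.root u lu hu).2
    have hlvlab : label.get? lv = some lv := (hInv2.root v lv hv).2
    have hlup2 : p2.get? lu = some lu := (hInv2.root u lu hu).1
    have hlvp2 : p2.get? lv = some lv := (hInv2.root v lv hv).1
    have hcont : p2.contains lu = true := by
      rw [PySem.Dict.contains_eq_isSome_get?, hlup2]; rfl
    refine ⟨p2.insert lu lv, by simp [pjUnion, hf1, hf2, hne], ?_⟩
    rw [if_pos (by exact hne)]
    refine ⟨?_, ?_, ?_, ?_, ?_, ?_⟩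
    · rw [PySem.Dict.keys_insert_of_contains p2 lv hcont, hInv2.keysP]
    · rw [keys_pjbRelabel, h.keysL]
    · intro k w hkw
      rw [PySem.Dict.get?_insert] at hkw
      split at hkw
      · rename_i hkx; cases hkw
        rw [hkx, get?_pjbRelabel, get?_pjbRelabel, hlulab, hlvlab]
        simp [Ne.symm hne]
      · have hstep := hInv2.step k w hkw
        rw [get?_pjbRelabel, get?_pjbRelabel, hstep]
    · intro k r hkr
      rw [get?_pjbRelabel] at hkr
      cases hlk : label.get? k with
      | none => rw [hlk] at hkr; cases hkr
      | some r0 =>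
        rw [hlk] at hkr
        simp only [Option.map_some] at hkr
        injection hkr with hr
        obtain ⟨hrp, hrl⟩ := hInv2.root k r0 hlk
        by_cases hr0 : r0 = lu
        · have hr' : r = lv := by rw [← hr, hr0]; simp
          subst hr'
          constructor
          · rw [PySem.Dict.get?_insert, if_neg (Ne.symm hne), hlvp2]
          · rw [get?_pjbRelabel, hlvlab]
            simp [Ne.symm hne]
        · have hr' : r = r0 := by rw [← hr]; simp [hr0]
          subst hr'
          constructor
          · rw [PySem.Dict.get?_insert, if_neg hr0, hrp]
          · rw [get?_pjbRelabel, hrl]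
            simp [hr0]
    · intro k hk
      rw [PySem.Dict.get?_insert] at hk
      split at hk
      · rename_i hkx; injection hk with he
        exact absurd (he.trans hkx) (Ne.symm hne)
      · rename_i hkx
        have := hInv2.selfl k hk
        rw [get?_pjbRelabel, this]
        simp [hkx]
    · refine ⟨fun k => if label.get? k = some lu then d k + d lv + 1 else d k, ?_⟩
      intro k w hkw
      rw [PySem.Dict.get?_insert] at hkw
      split at hkw
      · rename_i hkx; cases hkw
        right
        simp only [hkx, hlulab, hlvlab]
        rw [if_neg (show ¬ ((some lv : Option String) = some lu) by simp [Ne.symm hne]),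
          if_pos (trivial : True)]
        omega
      · rcases hd2 k w hkw with he | hlt
        · exact Or.inl he
        · right
          have hstep := hInv2.step k w hkw
          simp only [hstep]
          split <;> omega


-- proof-side flattening of A's nested union loops into one edge loop
def pjUnionEdges (fuel : Nat) :
    PySem.Dict String String → List (String × String) → Option (PySem.Dict String String)
  | parent, [] => some parent
  | parent, (u, v) :: es =>
    match pjUnion fuel parent u v with
    | none => none
    | some p' => pjUnionEdges fuel p' es

lemma pjUnionEdges_append (fuel : Nat) (es1 es2 : List (String × String)) :
    ∀ parent, pjUnionEdges fuel parent (es1 ++ es2)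
      = match pjUnionEdges fuel parent es1 with
        | none => none
        | some p' => pjUnionEdges fuel p' es2 := by
  induction es1 with
  | nil => intro parent; rfl
  | cons e rest ih =>
    intro parent
    obtain ⟨u, v⟩ := e
    simp only [List.cons_append, pjUnionEdges]
    cases pjUnion fuel parent u v with
    | none => rfl
    | some p' => exact ih p'

lemma pjGroups_eq_edges (fuel : Nat) (gs : List (List String)) :
    ∀ parent, pjGroups fuel parent gs = pjUnionEdges fuel parent (pjbEdges gs) := by
  induction gs with
  | nil => intro parent; rfl
  | cons g rest ih =>
    intro parent
    simp only [pjGroups, pjbEdges, List.flatMap_cons]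
    rw [show (List.flatMap _ rest) = pjbEdges rest from rfl, pjUnionEdges_append]
    cases g with
    | nil => simpa [pjGroup, pjUnionEdges] using ih parent
    | cons m0 ms =>
      simp only [pjGroup]
      have hu : ∀ (p : PySem.Dict String String),
          pjUnions fuel m0 p ms
            = pjUnionEdges fuel p (ms.map (fun m => (m0, m))) := by
        induction ms with
        | nil => intro p; rfl
        | cons m mrest ihm =>
          intro p
          simp only [pjUnions, List.map_cons, pjUnionEdges]
          cases pjUnion fuel p m0 m with
          | none => rfl
          | some p2 => exact ihm p2
      rw [hu]
      cases pjUnionEdges fuel parent (ms.map (fun m => (m0, m))) with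
      | none => rfl
      | some p' => exact ih p'

lemma pjMerge_sim (names : List String) (es : List (String × String)) :
    ∀ (parent label : PySem.Dict String String), PJInv names parent label →
      (pjbMerge label es = none ∧ pjUnionEdges (names.length + 1) parent es = none) ∨
      (∃ label' parent', pjbMerge label es = some label' ∧
        pjUnionEdges (names.length + 1) parent es = some parent' ∧
        PJInv names parent' label') := by
  induction es with
  | nil => intro parent label h; exact Or.inr ⟨label, parent, rfl, rfl, h⟩
  | cons e es ih =>
    obtain ⟨u, v⟩ := e
    intro parent label h
    cases hgu : label.get? u with
    | none =>
      left
      have hpu : parent.get? u = none := (pjInv_get?_none_iff names parent label h u).mpr hgu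
      constructor
      · simp [pjbMerge, hgu]
      · simp [pjUnionEdges, pjUnion, pjFind, hpu]
    | some lu =>
      cases hgv : label.get? v with
      | none =>
        left
        obtain ⟨d, hd, hbd⟩ := pjInv_bounded_meas names parent label h
        have hdu : d u < names.length + 1 := by
          have h1 := hbd u (pjInv_mem_keysL names parent label h hgu)
          have h2 : parent.keys.length ≤ names.length := by
            rw [h.keysP]; exact PySem.Set.length_ofList_le names
          omega
        obtain ⟨p1, hf1, hInv1, _⟩ :=
          pjFind_ok names label d (names.length + 1) parent u lu h hd hgu hdu
        have hpv : p1.get? v = none := (pjInv_get?_none_iff names p1 label hInv1 v).mpr hgv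
        constructor
        · simp [pjbMerge, hgu, hgv]
        · simp only [pjUnionEdges, pjUnion, hf1]
          simp [pjFind, hpv]
      | some lv =>
        obtain ⟨p', hp', hInv'⟩ := pjUnion_ok names parent label u v lu lv h hgu hgv
        have hbm : pjbMerge label ((u, v) :: es)
            = pjbMerge (if lu ≠ lv then pjbRelabel label lu lv else label) es := by
          simp [pjbMerge, hgu, hgv]
        have hue : pjUnionEdges (names.length + 1) parent ((u, v) :: es)
            = pjUnionEdges (names.length + 1) p' es := by
          simp [pjUnionEdges, hp']
        rw [hbm, hue]
        exact ih p' (if lu ≠ lv then pjbRelabel label lu lv else label) hInv'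


lemma pjCollect_ok (names : List String) (label : PySem.Dict String String) :
    ∀ (ns : List String) (parent : PySem.Dict String String)
      (acc : PySem.Dict String (PySem.Set String)),
      PJInv names parent label → (∀ n ∈ ns, ∃ l, label.get? n = some l) →
      pjCollect (names.length + 1) parent acc ns
        = some (ns.foldl
            (fun g n => g.modify ((label.get? n).getD "") PySem.Set.empty (fun s => s.add n))
            acc) := by
  intro ns
  induction ns with
  | nil => intro parent acc _ _; rfl
  | cons n rest ih =>
    intro parent acc hInv hall
    obtain ⟨l, hl⟩ := hall n (by simp)
    obtain ⟨d, hd, hbd⟩ := pjInv_bounded_meas names parent label hInv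
    have hdn : d n < names.length + 1 := by
      have h1 := hbd n (pjInv_mem_keysL names parent label hInv hl)
      have h2 : parent.keys.length ≤ names.length := by
        rw [hInv.keysP]; exact PySem.Set.length_ofList_le names
      omega
    obtain ⟨p', hf, hInv', _⟩ :=
      pjFind_ok names label d (names.length + 1) parent n l hInv hd hl hdn
    simp only [pjCollect, hf, List.foldl_cons, hl, Option.getD_some]
    exact ih p' _ hInv' (fun m hm => hall m (by simp [hm]))


-- proof-side form of B's output loop
def pjEmit (label : PySem.Dict String String) (names : List String) :
    PySem.Set String → List String → List (List String)
  | _, [] => []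
  | seen, n :: rest =>
    let l := (label.get? n).getD ""
    if l ∈ seen then pjEmit label names seen rest
    else PySem.Set.ofList (names.filter (fun m => label.get? m == some l))
      :: pjEmit label names (seen.add l) rest

lemma pjbOut_ok (label : PySem.Dict String String) (names : List String) :
    ∀ (ns : List String) (seen : PySem.Set String) (out : List (List String)),
      (∀ n ∈ ns, ∃ l, label.get? n = some l) →
      pjbOut label names seen out ns = some (out ++ pjEmit label names seen ns) := by
  intro ns
  induction ns with
  | nil => intro seen out _; simp [pjbOut, pjEmit]
  | cons n rest ih =>
    intro seen out hall
    obtain ⟨l, hl⟩ := hall n (by simp)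
    have hrest : ∀ m ∈ rest, ∃ l, label.get? m = some l := fun m hm => hall m (by simp [hm])
    simp only [pjbOut, hl, pjEmit, Option.getD_some]
    by_cases hmem : l ∈ seen
    · simp [hmem, ih _ _ hrest]
    · simp [hmem, ih _ _ hrest]

lemma dedup_filter (p : String → Bool) (xs : List String) :
    PySem.List.dedup (xs.filter p) = (PySem.List.dedup xs).filter p := by
  simp only [PySem.List.dedup]
  induction xs with
  | nil => simp
  | cons x rest ih =>
    rw [PySem.Set.ofList_cons]
    by_cases hp : p x
    · rw [List.filter_cons_of_pos hp, PySem.Set.ofList_cons, ih]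
      simp only [PySem.Set.discard, List.filter_cons_of_pos hp, List.filter_filter]
      congr 1
      apply List.filter_congr
      intro a _
      simp [Bool.and_comm]
    · rw [List.filter_cons_of_neg hp, ih]
      simp only [PySem.Set.discard]
      rw [List.filter_cons_of_neg hp, List.filter_filter]
      apply List.filter_congr
      intro a _
      by_cases hax : a = x
      · subst hax; simp [hp]
      · simp [hax]

lemma pjEmit_eq (label : PySem.Dict String String) (names : List String) :
    ∀ (ns : List String) (seen : PySem.Set String),
      pjEmit label names seen ns
        = (PySem.List.dedup
            ((ns.map (fun n => (label.get? n).getD "")).filter (fun c => !seen.contains c))).map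
            (fun c => PySem.Set.ofList (names.filter (fun m => label.get? m == some c))) := by
  intro ns
  induction ns with
  | nil => intro seen; simp [pjEmit]
  | cons n rest ih =>
    intro seen
    set l := (label.get? n).getD "" with hl
    by_cases hmem : l ∈ seen
    · simp only [pjEmit, ← hl, if_pos hmem, List.map_cons]
      rw [List.filter_cons_of_neg (by simp [hmem])]
      exact ih seen
    · simp only [pjEmit, ← hl, if_neg hmem, List.map_cons]
      rw [List.filter_cons_of_pos (by simp [hmem]), PySem.List.dedup, PySem.Set.ofList_cons,
        List.map_cons]
      congr 1
      rw [ih (PySem.Set.add seen l)]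
      have hadd : PySem.Set.add seen l = seen ++ [l] := PySem.Set.add_of_not_mem hmem
      congr 1
      rw [hadd]
      simp only [PySem.Set.discard]
      rw [← PySem.List.dedup_eq_ofList, ← dedup_filter]
      congr 1
      rw [List.filter_filter]
      apply List.filter_congr
      intro c _
      by_cases h1 : c ∈ seen <;> by_cases h2 : c = l <;> simp [h1, h2]

lemma getD_foldl_modify_add (f : String → String) :
    ∀ (l : List String) (acc : PySem.Dict String (PySem.Set String)) (c : String),
      (l.foldl (fun g n => g.modify (f n) PySem.Set.empty (fun s => s.add n)) acc).getD c
          PySem.Set.empty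
        = (l.filter (fun n => f n == c)).foldl PySem.Set.add (acc.getD c PySem.Set.empty) := by
  intro l
  induction l with
  | nil => intro acc c; rfl
  | cons n rest ih =>
    intro acc c
    simp only [List.foldl_cons, ih, PySem.Dict.getD_modify]
    by_cases hc : f n = c
    · subst hc; simp
    · simp [hc, Ne.symm hc]

lemma init_get? (names : List String) (k : String) :
    ∀ d : PySem.Dict String String,
      (names.foldl (fun d n => d.insert n n) d).get? k
        = if k ∈ names then some k else d.get? k := by
  induction names with
  | nil => simp
  | cons n rest ih =>
    intro d
    simp only [List.foldl_cons, ih, PySem.Dict.get?_insert]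
    by_cases hk : k ∈ rest
    · simp [hk]
    · by_cases hkn : k = n <;> simp [hk, hkn]

lemma pjInv_init (names : List String) :
    PJInv names (names.foldl (fun d n => d.insert n n) PySem.Dict.empty)
      (names.foldl (fun d n => d.insert n n) PySem.Dict.empty) := by
  have hg : ∀ k, (names.foldl (fun d n => d.insert n n) PySem.Dict.empty).get? k
      = if k ∈ names then some k else none := by
    intro k; rw [init_get?]; simp [PySem.Dict.get?_empty]
  have hkeys : (names.foldl (fun d n => d.insert n n) PySem.Dict.empty).keys
      = PySem.Set.ofList names := by
    have := PySem.Dict.keys_foldl_insert (ν := String) names (fun _ n => n) PySem.Dict.empty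
    simpa [PySem.Set.update_nil_left] using this
  refine ⟨hkeys, hkeys, ?_, ?_, ?_, ⟨fun _ => 0, ?_⟩⟩
  · intro k v h; rw [hg] at h; split at h
    · cases h; rfl
    · cases h
  · intro k r h; rw [hg] at h; split at h
    · cases h; constructor <;> (rw [hg]; simp_all)
    · cases h
  · intro k h; rw [hg] at h; split at h
    · cases h; rw [hg]; simp_all
    · cases h
  · intro k v h; rw [hg] at h; split at h
    · cases h; left; rfl
    · cases h

-- A's grouping dict, flattened to values, equals B's emit loop
lemma values_eq_emit (label : PySem.Dict String String) (names : List String)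
    (hall : ∀ n ∈ names, ∃ l, label.get? n = some l) :
    (names.foldl
        (fun g n => g.modify ((label.get? n).getD "") PySem.Set.empty (fun s => s.add n))
        PySem.Dict.empty).values
      = pjEmit label names PySem.Set.empty names := by
  set f : String → String := fun n => (label.get? n).getD "" with hf
  set G := names.foldl (fun g n => g.modify (f n) PySem.Set.empty (fun s => s.add n))
      PySem.Dict.empty with hG
  have hkeys : G.keys = PySem.Set.ofList (names.map f) := by
    rw [hG, PySem.Dict.keys_foldl_modify_key names f PySem.Set.empty
      (fun _ n => (fun s => s.add n)) PySem.Dict.empty]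
    simp [PySem.Set.update_nil_left, PySem.Dict.keys_empty]
  have hnd : G.keys.Nodup := by rw [hkeys]; exact PySem.Set.nodup_ofList _
  rw [PySem.Dict.values_eq_map_keys G hnd PySem.Set.empty, hkeys]
  rw [pjEmit_eq]
  have hfilter : ∀ c : String,
      (names.filter (fun n => f n == c)) = names.filter (fun m => label.get? m == some c) := by
    intro c
    apply List.filter_congr
    intro m hm
    obtain ⟨l, hl⟩ := hall m hm
    simp [hf, hl]
  have hft : (List.map (fun n => (label.get? n).getD "") names).filter
      (fun c => !PySem.Set.contains PySem.Set.empty c) = List.map f names := by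
    apply List.filter_eq_self.mpr
    intro a _
    rfl
  rw [hft, ← PySem.List.dedup_eq_ofList]
  apply List.map_congr_left
  intro c _
  rw [getD_foldl_modify_add f names PySem.Dict.empty c, PySem.Dict.getD_empty,
    hfilter c, PySem.Set.ofList_eq_foldl]
  rfl

-- ===== VERDICT (by name: the statement is the Claim_ definition above) =====
theorem partition_join_spec : Claim_equal_partition_join := by
  intro P Q names _ _
  unfold Spec_partition_join partition_join partition_join_alt
  dsimp only
  have hInv0 := pjInv_init names
  rw [pjGroups_eq_edges]
  rcases pjMerge_sim names (pjbEdges (P ++ Q))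
      (names.foldl (fun d n => d.insert n n) PySem.Dict.empty)
      (names.foldl (fun d n => d.insert n n) PySem.Dict.empty) hInv0 with
    ⟨hb, ha⟩ | ⟨label', parent', hb, ha, hInv'⟩
  · rw [ha, hb]
  · rw [ha, hb]
    dsimp only
    have hall : ∀ n ∈ names, ∃ l, label'.get? n = some l := by
      intro n hn
      cases hg : label'.get? n with
      | none =>
        rw [PySem.Dict.get?_eq_none_iff_not_mem_keys, hInv'.keysL] at hg
        exact absurd ((PySem.Set.mem_ofList _ _).mpr hn) hg
      | some l => exact ⟨l, rfl⟩
    rw [pjCollect_ok names label' names parent' PySem.Dict.empty hInv' hall,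
      pjbOut_ok label' names names PySem.Set.empty [] hall]
    simp only [List.nil_append]
    exact values_eq_emit label' names hall
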